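-- pv_equiv track=rewrite | github.com/wzygxr/shuati | class114_KMP_Algorithm/Code07_PeriodsOfWords.py | calculate_periods_sum
-- ===== SOURCE A (Python) =====
-- def build_next_array(s):
--     """
--     构建KMP算法的next数组（部分匹配表）
--
--     next[i]表示s[0...i]子串的最长相等前后缀的长度
--
--     算法思路：
--     1. 初始化next[0] = 0
--     2. 使用双指针i和j，i指向当前处理的位置，j指向前缀的末尾
--     3. 如果s[i] == s[j]，说明前缀和后缀可以延长，next[i] = j + 1
--     4. 如果s[i] != s[j]，需要回退j指针到next[j-1]，直到匹配或j=0
--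
--     :param s: 输入字符串
--     :return: next数组
--     """
--     length = len(s)
--     next_array = [0] * length
--
--     # 初始化
--     next_array[0] = 0
--     prefix_len = 0  # 当前最长相等前后缀的长度
--     i = 1  # 当前处理的位置
--
--     # 从位置1开始处理
--     while i < length:
--         # 如果当前字符匹配，可以延长相等前后缀
--         if s[i] == s[prefix_len]:
--             prefix_len += 1
--             next_array[i] = prefix_len
--             i += 1
--         # 如果不匹配且前缀长度大于0，需要回退
--         elif prefix_len > 0:
--             prefix_len = next_array[prefix_len - 1]
--         # 如果不匹配且前缀长度为0，next[i] = 0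
--         else:
--             next_array[i] = 0
--             i += 1
--
--     return next_array
--
-- def calculate_periods_sum(s):
--     """
--     计算字符串所有周期的总和
--
--     :param s: 输入字符串
--     :return: 所有周期的总和
--     """
--     n = len(s)
--
--     # 边界条件处理
--     if n <= 1:
--         return 0
--
--     # 构建next数组
--     next_array = build_next_array(s)
--
--     total_sum = 0
--
--     # 从最后一个位置开始，通过next数组找到所有周期
--     pos = n - 1
--     while pos > 0:
--         # 如果当前位置有匹配的前后缀
--         if next_array[pos] > 0:
--             # 周期长度为 pos + 1 - next[pos]
--             period = (pos + 1) - next_array[pos]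
--             # 如果周期长度小于当前位置+1，则是一个有效周期
--             if period < pos + 1:
--                 total_sum += period
--             # 移动到next[pos]-1位置继续查找
--             pos = next_array[pos] - 1
--         else:
--             # 没有匹配的前后缀，向前移动
--             pos -= 1
--
--     return total_sum
-- ===== SOURCE B (Python) =====
-- def calculate_periods_sum(s):
--     """Same result as the KMP version, but the failure table is built from the
--     Z-array (sliding-window Z-algorithm + standard Z-to-prefix conversion)."""
--     n = len(s)
--     if n <= 1:
--         return 0
--
--     # Z-array: z[i] = length of the longest common prefix of s and s[i:]
--     z = [0] * n
--     z[0] = n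
--     l = r = 0
--     for i in range(1, n):
--         zi = 0
--         if i < r:
--             zi = min(r - i, z[i - l])
--         while i + zi < n and s[zi] == s[i + zi]:
--             zi += 1
--         z[i] = zi
--         if i + zi > r:
--             l, r = i, i + zi
--
--     # convert Z to the prefix/failure array
--     fail = [0] * n
--     for i in range(n - 1, 0, -1):
--         zi = z[i]
--         if zi > 0 and zi > fail[i + zi - 1]:
--             fail[i + zi - 1] = zi
--     for j in range(n - 2, 0, -1):
--         v = fail[j + 1] - 1
--         if v > fail[j]:
--             fail[j] = v
--
--     # walk the border chain down from the last position
--     total = 0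
--     pos = n - 1
--     while pos > 0:
--         f = fail[pos]
--         if f > 0:
--             total += (pos + 1) - f
--             pos = f - 1
--         else:
--             pos -= 1
--     return total
-- ===== Notes on version B (the rewrite author's own statement) =====
-- stated objective: alternative
-- what changed: The KMP two-pointer construction of the failure (longest-proper-border) table is replaced by the Z-algorithm with a sliding window followed by the standard Z-to-prefix-function conversion (a max pass at the end positions of Z-boxes plus a downward decrement-propagation pass); the final border-chain walk is kept, without A's redundant guard (which always holds when the failure value is positive).
import Mathlib
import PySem

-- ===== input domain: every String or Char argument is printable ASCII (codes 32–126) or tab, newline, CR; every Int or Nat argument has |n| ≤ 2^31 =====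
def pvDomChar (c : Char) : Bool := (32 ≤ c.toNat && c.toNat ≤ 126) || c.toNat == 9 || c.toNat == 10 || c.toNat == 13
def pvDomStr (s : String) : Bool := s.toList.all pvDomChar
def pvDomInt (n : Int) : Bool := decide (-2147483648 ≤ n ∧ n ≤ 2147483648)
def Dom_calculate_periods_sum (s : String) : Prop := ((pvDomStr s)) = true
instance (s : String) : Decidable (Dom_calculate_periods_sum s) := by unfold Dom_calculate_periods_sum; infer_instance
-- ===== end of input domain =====

-- B replaces A's KMP two-pointer construction of the failure table by the Z-algorithm plus the
-- standard Z-to-prefix-function conversion (objective: alternative algorithm, same O(n) cost);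
-- the final border-chain walk is the same and the return value is proved identical on all inputs.

-- ===== PORT A =====
-- A's build_next_array while-loop; fuel 2*n bounds the number of iterations (each step
-- strictly increases 2*i - prefix_len, which stays within [2, 2*n]).
def kmpLoop (cs : List Char) : Nat → List Nat → Nat → Nat → List Nat
  | 0, arr, _, _ => arr
  | fuel+1, arr, pl, i =>
    if i < cs.length then
      if cs.getD i 'a' == cs.getD pl 'a' then
        kmpLoop cs fuel (arr.set i (pl+1)) (pl+1) (i+1)
      else if 0 < pl then
        kmpLoop cs fuel arr (arr.getD (pl-1) 0) i
      else
        kmpLoop cs fuel (arr.set i 0) pl (i+1)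
    else arr

def build_next_array (cs : List Char) : List Nat :=
  kmpLoop cs (2 * cs.length) ((List.replicate cs.length 0).set 0 0) 0 1

-- A's final while-loop; pos strictly decreases on the arrays A builds, so fuel n suffices.
def walkA (arr : List Nat) : Nat → Nat → Nat → Nat
  | 0, _, total => total
  | fuel+1, pos, total =>
    if 0 < pos then
      if 0 < arr.getD pos 0 then
        walkA arr fuel (arr.getD pos 0 - 1)
          (if (pos + 1) - arr.getD pos 0 < pos + 1 then total + ((pos + 1) - arr.getD pos 0) else total)
      else walkA arr fuel (pos - 1) total
    else total

def calculate_periods_sum (s : String) : Int :=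
  let cs := s.toList
  let n := cs.length
  if n ≤ 1 then 0
  else ((walkA (build_next_array cs) n (n - 1) 0 : Nat) : Int)

-- ===== PORT B =====
-- B's inner `while i + zi < n and s[zi] == s[i+zi]` extension loop; the extension length is
-- bounded by n, so fuel n makes the recursion structural.
def zExtend (cs : List Char) (i : Nat) : Nat → Nat → Nat
  | k, 0 => k
  | k, fuel+1 =>
    if i + k < cs.length ∧ cs.getD k 'a' == cs.getD (i + k) 'a' then
      zExtend cs i (k + 1) fuel
    else k

-- B's `for i in range(1, n)` Z-algorithm loop with the sliding [l, r) window; fuel n covers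
-- the n-1 iterations.
def zLoop (cs : List Char) : Nat → List Nat → Nat → Nat → Nat → List Nat
  | 0, z, _, _, _ => z
  | fuel+1, z, l, r, i =>
    if i < cs.length then
      let z0 := if i < r then min (r - i) (z.getD (i - l) 0) else 0
      let zi := zExtend cs i z0 cs.length
      let z' := z.set i zi
      if r < i + zi then zLoop cs fuel z' i (i + zi) (i + 1)
      else zLoop cs fuel z' l r (i + 1)
    else z

def zArray (cs : List Char) : List Nat :=
  zLoop cs cs.length ((List.replicate cs.length 0).set 0 cs.length) 0 0 1

-- B's `for i in range(n-1, 0, -1)` conversion pass (counts i down; index 0 is not visited).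
def conv1 (z : List Nat) : Nat → List Nat → List Nat
  | 0, fail => fail
  | i+1, fail =>
    conv1 z i
      (if 0 < z.getD (i+1) 0 ∧ fail.getD ((i+1) + z.getD (i+1) 0 - 1) 0 < z.getD (i+1) 0 then
        fail.set ((i+1) + z.getD (i+1) 0 - 1) (z.getD (i+1) 0)
      else fail)

-- B's `for j in range(n-2, 0, -1)` propagation pass.
def conv2 : Nat → List Nat → List Nat
  | 0, fail => fail
  | j+1, fail =>
    conv2 j
      (if fail.getD (j+1) 0 < fail.getD (j+2) 0 - 1 then
        fail.set (j+1) (fail.getD (j+2) 0 - 1)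
      else fail)

-- B's final while-loop (same chain walk, without A's redundant `period < pos+1` guard).
def walkB (arr : List Nat) : Nat → Nat → Nat → Nat
  | 0, _, total => total
  | fuel+1, pos, total =>
    if 0 < pos then
      if 0 < arr.getD pos 0 then
        walkB arr fuel (arr.getD pos 0 - 1) (total + ((pos + 1) - arr.getD pos 0))
      else walkB arr fuel (pos - 1) total
    else total

def calculate_periods_sum_alt (s : String) : Int :=
  let cs := s.toList
  let n := cs.length
  if n ≤ 1 then 0
  else
    ((walkB (conv2 (n - 2) (conv1 (zArray cs) (n - 1) (List.replicate n 0))) n (n - 1) 0 : Nat) : Int)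

-- ===== PRECONDITION & SPEC =====
def Spec_calculate_periods_sum (s : String) (out : Int) : Prop := out = calculate_periods_sum_alt s
instance (s : String) (out : Int) : Decidable (Spec_calculate_periods_sum s out) := by unfold Spec_calculate_periods_sum; infer_instance

-- ===== CLAIM (what is proved, stated in full; the proofs are below) =====
def Claim_equal_calculate_periods_sum : Prop := ∀ (s : String), Dom_calculate_periods_sum s → Spec_calculate_periods_sum s (calculate_periods_sum s)

-- ===== LEMMAS AND PROOFS =====

def IsBorder (t : List Char) (k : Nat) : Prop := k ≤ t.length ∧ t.take k = t.drop (t.length - k)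

def bfT (t : List Char) : Nat :=
  Nat.findGreatest (fun k => t.take k = t.drop (t.length - k)) (t.length - 1)

theorem isBorder_zero (t : List Char) : IsBorder t 0 := ⟨Nat.zero_le _, by simp⟩

theorem bfT_border (t : List Char) : IsBorder t (bfT t) := by
  refine ⟨le_trans (Nat.findGreatest_le _) (Nat.sub_le _ _), ?_⟩
  exact Nat.findGreatest_spec (P := fun k => t.take k = t.drop (t.length - k))
    (Nat.zero_le _) (by simp)

theorem bfT_le (t : List Char) : bfT t ≤ t.length - 1 := Nat.findGreatest_le _

theorem bfT_max {t : List Char} {k : Nat} (h : IsBorder t k) (hk : k < t.length) : k ≤ bfT t :=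
  Nat.le_findGreatest (P := fun k => t.take k = t.drop (t.length - k)) (by omega) h.2

theorem border_nest {t : List Char} {j k : Nat} (hj : IsBorder t j) (hk : IsBorder t k)
    (hjk : j ≤ k) : IsBorder (t.take k) j := by
  obtain ⟨hjl, hjb⟩ := hj
  obtain ⟨hkl, hkb⟩ := hk
  refine ⟨by simp; omega, ?_⟩
  rw [List.length_take, List.take_take, Nat.min_def]
  rw [if_pos (by omega)]
  rw [min_eq_left hkl, hkb, List.drop_drop, hjb]
  congr 1
  omega

theorem border_lift {t : List Char} {j k : Nat} (hk : IsBorder t k)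
    (hj : IsBorder (t.take k) j) : IsBorder t j := by
  obtain ⟨hkl, hkb⟩ := hk
  obtain ⟨hjl, hjb⟩ := hj
  rw [List.length_take, min_eq_left hkl] at hjl hjb
  refine ⟨by omega, ?_⟩
  rw [List.take_take, Nat.min_def, if_pos hjl] at hjb
  rw [hjb, hkb, List.drop_drop]
  congr 1
  omega

theorem take_succ_getD (l : List Char) (m : Nat) (h : m < l.length) :
    l.take (m+1) = l.take m ++ [l.getD m 'a'] := by
  rw [List.take_add_one, List.getD_eq_getElem l 'a' h, List.getElem?_eq_getElem h]
  rfl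

theorem border_snoc {t : List Char} {c : Char} {k : Nat} (hk : k < t.length) :
    IsBorder (t ++ [c]) (k+1) ↔ (IsBorder t k ∧ t.getD k 'a' = c) := by
  have h1 : (t ++ [c]).take (k+1) = t.take k ++ [t.getD k 'a'] := by
    rw [List.take_append_of_le_length (by omega), take_succ_getD t k hk]
  have h2 : (t ++ [c]).drop ((t ++ [c]).length - (k+1)) = t.drop (t.length - k) ++ [c] := by
    rw [List.length_append, List.length_cons, List.length_nil]
    rw [List.drop_append_of_le_length (by omega)]
    congr 2
    omega
  constructor
  · rintro ⟨-, hb⟩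
    rw [h1, h2] at hb
    have := List.append_inj hb (by rw [List.length_take, List.length_drop]; omega)
    refine ⟨⟨by omega, this.1⟩, by simpa using this.2⟩
  · rintro ⟨⟨-, hb⟩, hc⟩
    exact ⟨by simp; omega, by rw [h1, h2, hb, hc]⟩

def lcp : List Char → List Char → Nat
  | a :: as, b :: bs => if a = b then lcp as bs + 1 else 0
  | _, _ => 0

theorem lcp_le_right (a b : List Char) : lcp a b ≤ b.length := by
  induction a generalizing b with
  | nil => simp [lcp]
  | cons x xs ih =>
    cases b with
    | nil => simp [lcp]
    | cons y ys =>
      simp only [lcp, List.length_cons]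
      split
      · exact Nat.succ_le_succ (ih ys)
      · omega

theorem lcp_getD {a b : List Char} {j : Nat} (h : j < lcp a b) :
    a.getD j 'a' = b.getD j 'a' := by
  induction a generalizing b j with
  | nil => simp [lcp] at h
  | cons x xs ih =>
    cases b with
    | nil => simp [lcp] at h
    | cons y ys =>
      simp only [lcp] at h
      split at h
      · cases j with
        | zero => simpa using ‹x = y›
        | succ j' => exact ih (b := ys) (by omega)
      · omega

theorem lcp_stop {a b : List Char} (ha : lcp a b < a.length) (hb : lcp a b < b.length) :
    a.getD (lcp a b) 'a' ≠ b.getD (lcp a b) 'a' := by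
  induction a generalizing b with
  | nil => simp at ha
  | cons x xs ih =>
    cases b with
    | nil => simp at hb
    | cons y ys =>
      by_cases hxy : x = y
      · simp only [lcp, if_pos hxy, List.length_cons] at ha hb
        simp only [lcp, if_pos hxy, List.getD_cons_succ]
        exact ih (by omega) (by omega)
      · simp only [lcp, if_neg hxy]
        simpa using hxy

theorem le_lcp {a b : List Char} {k : Nat} (h : ∀ j, j < k → a.getD j 'a' = b.getD j 'a')
    (hka : k ≤ a.length) (hkb : k ≤ b.length) : k ≤ lcp a b := by
  induction a generalizing b k with
  | nil => simp at hka; omega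
  | cons x xs ih =>
    cases b with
    | nil => simp at hkb; omega
    | cons y ys =>
      cases k with
      | zero => exact Nat.zero_le _
      | succ k' =>
        have hxy : x = y := by simpa using h 0 (by omega)
        simp only [lcp, if_pos hxy]
        have := ih (b := ys) (k := k') (fun j hj => by simpa using h (j+1) (by omega))
          (by simp at hka; omega) (by simp at hkb; omega)
        omega

theorem getD_drop (l : List Char) (i j : Nat) : (l.drop i).getD j 'a' = l.getD (i + j) 'a' := by
  by_cases h : i + j < l.length
  · rw [List.getD_eq_getElem _ _ (by simp; omega), List.getD_eq_getElem _ _ h, List.getElem_drop]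
  · rw [List.getD_eq_default _ _ (by simp; omega), List.getD_eq_default _ _ (by omega)]

theorem zExtend_stop {cs : List Char} {i : Nat} (hi : 1 ≤ i) :
    ∀ fuel, zExtend cs i (lcp cs (cs.drop i)) fuel = lcp cs (cs.drop i) := by
  intro fuel
  cases fuel with
  | zero => rfl
  | succ fuel =>
    simp only [zExtend]
    rw [if_neg]
    rintro ⟨h1, h2⟩
    have hL : lcp cs (cs.drop i) ≤ cs.length - i := by
      have := lcp_le_right cs (cs.drop i); simpa using this
    refine lcp_stop (a := cs) (b := cs.drop i) (by omega) (by simp; omega) ?_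
    rw [getD_drop]
    exact of_decide_eq_true h2

theorem zExtend_eq {cs : List Char} {i : Nat} (hi : 1 ≤ i) :
    ∀ fuel k, k ≤ lcp cs (cs.drop i) → lcp cs (cs.drop i) - k ≤ fuel →
      zExtend cs i k fuel = lcp cs (cs.drop i) := by
  intro fuel
  induction fuel with
  | zero =>
    intro k hk hd
    have : k = lcp cs (cs.drop i) := by omega
    subst this
    rfl
  | succ fuel ih =>
    intro k hk hd
    rcases eq_or_lt_of_le hk with heq | hlt
    · subst heq; exact zExtend_stop hi _
    · have hL : lcp cs (cs.drop i) ≤ cs.length - i := by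
        have := lcp_le_right cs (cs.drop i); simpa using this
      have hc : (cs.getD k 'a' == cs.getD (i + k) 'a') = true := by
        have := lcp_getD (a := cs) (b := cs.drop i) (j := k) hlt
        rw [getD_drop] at this
        exact beq_iff_eq.mpr this
      simp only [zExtend]
      rw [if_pos ⟨by omega, hc⟩]
      exact ih (k+1) (by omega) (by omega)

theorem lcp_take (a b : List Char) : a.take (lcp a b) = b.take (lcp a b) := by
  induction a generalizing b with
  | nil => simp [lcp]
  | cons x xs ih =>
    cases b with
    | nil => simp [lcp]
    | cons y ys =>
      by_cases hxy : x = y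
      · subst hxy
        have h1 : lcp (x :: xs) (x :: ys) = lcp xs ys + 1 := by simp [lcp]
        rw [h1, List.take_succ_cons, List.take_succ_cons, ih ys]
      · simp [lcp, if_neg hxy]

theorem getD_take {l : List Char} {k j : Nat} (hj : j < k) :
    (l.take k).getD j 'a' = l.getD j 'a' := by
  by_cases h : j < l.length
  · rw [List.getD_eq_getElem _ _ (by simp; omega), List.getD_eq_getElem _ _ h, List.getElem_take]
  · rw [List.getD_eq_default _ _ (by simp; omega), List.getD_eq_default _ _ (by omega)]

theorem take_eq_iff_le_lcp {a b : List Char} {k : Nat} (hka : k ≤ a.length) (hkb : k ≤ b.length) :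
    a.take k = b.take k ↔ k ≤ lcp a b := by
  constructor
  · intro h
    refine le_lcp (fun j hj => ?_) hka hkb
    rw [← getD_take (l := a) hj, ← getD_take (l := b) hj, h]
  · intro h
    have h2 : a.take k = (a.take (lcp a b)).take k := by
      rw [List.take_take, min_eq_left h]
    rw [h2, lcp_take, List.take_take, min_eq_left h]

theorem border_iff_lcp {cs : List Char} {m k : Nat} (hkm : k ≤ m) (hm : m ≤ cs.length) :
    IsBorder (cs.take m) k ↔ k ≤ lcp cs (cs.drop (m - k)) := by
  have e1 : (cs.take m).take k = cs.take k := by rw [List.take_take, min_eq_left hkm]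
  have e2 : (cs.take m).drop ((cs.take m).length - k) = (cs.drop (m - k)).take k := by
    rw [List.length_take, min_eq_left hm, List.drop_take]
    congr 1
    omega
  constructor
  · rintro ⟨-, hb⟩
    rw [e1, e2] at hb
    exact (take_eq_iff_le_lcp (by omega) (by simp; omega)).mp hb
  · intro h
    refine ⟨by simp; omega, ?_⟩
    rw [e1, e2]
    exact (take_eq_iff_le_lcp (by omega) (by simp; omega)).mpr h

theorem getD_set_self {l : List Nat} {i : Nat} {v : Nat} (h : i < l.length) :
    (l.set i v).getD i 0 = v := by
  rw [List.getD_eq_getElem _ _ (by simpa using h), List.getElem_set, if_pos rfl]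

theorem getD_set_ne {l : List Nat} {i j : Nat} {v : Nat} (h : i ≠ j) :
    (l.set i v).getD j 0 = l.getD j 0 := by
  by_cases hj : j < l.length
  · rw [List.getD_eq_getElem _ _ (by simpa using hj), List.getD_eq_getElem _ _ hj,
      List.getElem_set, if_neg h]
  · rw [List.getD_eq_default _ _ (by simp; omega), List.getD_eq_default _ _ (by omega)]

theorem zLoop_spec {cs : List Char} :
    ∀ (d : Nat) (z : List Nat) (l r i : Nat), cs.length - i ≤ d →
      z.length = cs.length → 1 ≤ i →
      (∀ j, 1 ≤ j → j < i → z.getD j 0 = lcp cs (cs.drop j)) →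
      ((r = 0 ∧ l = 0) ∨ (1 ≤ l ∧ l < i ∧ r ≤ cs.length ∧ r - l ≤ lcp cs (cs.drop l))) →
      ∀ j, 1 ≤ j → j < cs.length → (zLoop cs d z l r i).getD j 0 = lcp cs (cs.drop j) := by
  intro d
  induction d with
  | zero =>
    intro z l r i hd hlen hi hz hwin j hj1 hj2
    exact hz j hj1 (by omega)
  | succ d ih =>
    intro z l r i hd hlen hi hz hwin j hj1 hj2
    by_cases hilen : i < cs.length
    case neg =>
      simp only [zLoop]
      rw [if_neg hilen]
      exact hz j hj1 (by omega)
    case pos =>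
    have hLle : lcp cs (cs.drop i) ≤ cs.length - i := by
      have := lcp_le_right cs (cs.drop i); simpa using this
    have hz0 : (if i < r then min (r - i) (z.getD (i - l) 0) else 0) ≤ lcp cs (cs.drop i) := by
      split
      case isFalse => exact Nat.zero_le _
      case isTrue h =>
        rcases hwin with ⟨hr0, hl0⟩ | ⟨hl1, hli, hrn, hrl⟩
        · omega
        · have hzil : z.getD (i - l) 0 = lcp cs (cs.drop (i - l)) := hz _ (by omega) (by omega)
          refine le_lcp (fun q hq => ?_) (by omega) (by simp; omega)
          rw [getD_drop]
          have hq1 : q < lcp cs (cs.drop (i - l)) := by rw [← hzil]; omega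
          have e1 : cs.getD q 'a' = cs.getD ((i - l) + q) 'a' := by
            have := lcp_getD (a := cs) (b := cs.drop (i - l)) hq1
            rwa [getD_drop] at this
          have hq2 : (i - l) + q < lcp cs (cs.drop l) := by omega
          have e2 : cs.getD ((i - l) + q) 'a' = cs.getD (l + ((i - l) + q)) 'a' := by
            have := lcp_getD (a := cs) (b := cs.drop l) hq2
            rwa [getD_drop] at this
          rw [e1, e2]
          congr 1
          omega
    simp only [zLoop]
    rw [if_pos hilen]
    have hzi : zExtend cs i (if i < r then min (r - i) (z.getD (i - l) 0) else 0) cs.length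
        = lcp cs (cs.drop i) := zExtend_eq hi cs.length _ hz0 (by omega)
    simp only [hzi]
    have hz' : ∀ j', 1 ≤ j' → j' < i + 1 →
        (z.set i (lcp cs (cs.drop i))).getD j' 0 = lcp cs (cs.drop j') := by
      intro j' h1 h2
      rcases eq_or_lt_of_le (Nat.lt_succ_iff.mp h2) with he | hlt'
      · rw [he, getD_set_self (by omega)]
      · rw [getD_set_ne (by omega)]
        exact hz j' h1 hlt'
    split
    case isTrue hbranch =>
      exact ih (z.set i (lcp cs (cs.drop i))) i (i + lcp cs (cs.drop i)) (i+1) (by omega)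
        (by simpa using hlen) (by omega) hz'
        (Or.inr ⟨by omega, by omega, by omega, by omega⟩) j hj1 hj2
    case isFalse hbranch =>
      refine ih (z.set i (lcp cs (cs.drop i))) l r (i+1) (by omega)
        (by simpa using hlen) (by omega) hz' ?_ j hj1 hj2
      rcases hwin with ⟨h1, h2⟩ | ⟨h1, h2, h3, h4⟩
      · exact Or.inl ⟨h1, h2⟩
      · exact Or.inr ⟨h1, by omega, h3, h4⟩

theorem zArray_spec {cs : List Char} :
    ∀ j, 1 ≤ j → j < cs.length → (zArray cs).getD j 0 = lcp cs (cs.drop j) := by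
  intro j hj1 hj2
  refine zLoop_spec cs.length _ 0 0 1 (by omega) (by simp) (by omega)
    (fun j' h1 h2 => by omega) (Or.inl ⟨rfl, rfl⟩) j hj1 hj2

def Mup (z : List Nat) : Nat → Nat → Nat
  | 0, _ => 0
  | t+1, j =>
    max (Mup z t j)
      (if 0 < z.getD (t+1) 0 ∧ (t+1) + z.getD (t+1) 0 - 1 = j then z.getD (t+1) 0 else 0)

theorem le_Mup {z : List Nat} {t i j : Nat} (ht : 1 ≤ t) (hti : t ≤ i)
    (hz : 0 < z.getD t 0) (hj : t + z.getD t 0 - 1 = j) : z.getD t 0 ≤ Mup z i j := by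
  induction i with
  | zero => omega
  | succ i ih =>
    rcases eq_or_lt_of_le hti with he | hlt
    · subst he
      simp only [Mup]
      rw [if_pos ⟨hz, hj⟩]
      omega
    · have := ih (by omega)
      simp only [Mup]
      omega

theorem Mup_le {z : List Nat} {j c : Nat} :
    ∀ {i}, (∀ t, 1 ≤ t → t ≤ i → 0 < z.getD t 0 → t + z.getD t 0 - 1 = j → z.getD t 0 ≤ c) →
    Mup z i j ≤ c := by
  intro i
  induction i with
  | zero => intro _; simp [Mup]
  | succ i ih =>
    intro h
    simp only [Mup]
    have h1 := ih (fun t a b hc hd => h t a (by omega) hc hd)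
    split
    case isTrue hc => exact max_le h1 (h (i+1) (by omega) (by omega) hc.1 hc.2)
    case isFalse hc => omega

theorem conv1_length {z : List Nat} : ∀ (i : Nat) (fail : List Nat),
    (conv1 z i fail).length = fail.length := by
  intro i
  induction i with
  | zero => intro fail; rfl
  | succ i ih =>
    intro fail
    simp only [conv1]
    rw [ih]
    split <;> simp

theorem conv1_getD {z : List Nat} :
    ∀ (i : Nat) (fail : List Nat),
      (∀ t, 1 ≤ t → t ≤ i → 0 < z.getD t 0 → t + z.getD t 0 - 1 < fail.length) →
      ∀ (j : Nat), (conv1 z i fail).getD j 0 = max (fail.getD j 0) (Mup z i j) := by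
  intro i
  induction i with
  | zero => intro fail _ j; simp [conv1, Mup]
  | succ i ih =>
    intro fail hb j
    simp only [conv1, Mup]
    by_cases hw : 0 < z.getD (i+1) 0 ∧ fail.getD ((i+1) + z.getD (i+1) 0 - 1) 0 < z.getD (i+1) 0
    · rw [if_pos hw]
      rw [ih _ (fun t h1 h2 h3 => by
        rw [List.length_set]; exact hb t h1 (by omega) h3)]
      by_cases hj : (i+1) + z.getD (i+1) 0 - 1 = j
      · rw [← hj, getD_set_self (hb (i+1) (by omega) (by omega) hw.1)]
        rw [if_pos ⟨hw.1, rfl⟩, hj]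
        have h2 := hw.2
        rw [hj] at h2
        omega
      · rw [getD_set_ne hj]
        rw [if_neg (fun hc => hj hc.2)]
        omega
    · rw [if_neg hw]
      rw [ih _ (fun t h1 h2 h3 => hb t h1 (by omega) h3)]
      by_cases hj : 0 < z.getD (i+1) 0 ∧ (i+1) + z.getD (i+1) 0 - 1 = j
      · rw [if_pos hj]
        have : ¬ fail.getD ((i+1) + z.getD (i+1) 0 - 1) 0 < z.getD (i+1) 0 := fun h => hw ⟨hj.1, h⟩
        rw [hj.2] at this
        omega
      · rw [if_neg hj]
        omega

theorem key_top {cs : List Char} {z : List Nat} (hn : 2 ≤ cs.length)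
    (hspec : ∀ j, 1 ≤ j → j < cs.length → z.getD j 0 = lcp cs (cs.drop j)) :
    bfT cs = Mup z (cs.length - 1) (cs.length - 1) := by
  have htl : cs.take cs.length = cs := List.take_length
  apply le_antisymm
  · rcases Nat.eq_zero_or_pos (bfT cs) with h0 | h1
    · omega
    · set k := bfT cs with hk
      have hb : IsBorder (cs.take cs.length) k := by rw [htl]; exact bfT_border cs
      have hkle : k ≤ cs.length - 1 := bfT_le cs
      have hlcp : k ≤ lcp cs (cs.drop (cs.length - k)) :=
        (border_iff_lcp (by omega) (le_refl _)).mp hb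
      have hup : lcp cs (cs.drop (cs.length - k)) ≤ k := by
        have := lcp_le_right cs (cs.drop (cs.length - k))
        simp only [List.length_drop] at this
        omega
      have hz : z.getD (cs.length - k) 0 = lcp cs (cs.drop (cs.length - k)) :=
        hspec _ (by omega) (by omega)
      have : z.getD (cs.length - k) 0 = k := by omega
      have := le_Mup (z := z) (t := cs.length - k) (i := cs.length - 1)
        (j := cs.length - 1) (by omega) (by omega) (by omega) (by omega)
      omega
  · apply Mup_le
    intro t h1 h2 h3 h4
    have hz : z.getD t 0 = lcp cs (cs.drop t) := hspec t h1 (by omega)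
    have hup : lcp cs (cs.drop t) ≤ cs.length - t := by
      have := lcp_le_right cs (cs.drop t)
      simpa using this
    have hv : z.getD t 0 = cs.length - t := by omega
    have hb : IsBorder (cs.take cs.length) (z.getD t 0) := by
      refine (border_iff_lcp (by omega) (le_refl _)).mpr ?_
      have : cs.length - z.getD t 0 = t := by omega
      rw [this]
      omega
    rw [htl] at hb
    exact bfT_max hb (by omega)

theorem key_mid {cs : List Char} {z : List Nat} {j : Nat} (hj : 1 ≤ j)
    (hjn : j ≤ cs.length - 2) (hn : 2 ≤ cs.length)
    (hspec : ∀ t, 1 ≤ t → t < cs.length → z.getD t 0 = lcp cs (cs.drop t)) :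
    bfT (cs.take (j+1)) = max (Mup z (cs.length - 1) j) (bfT (cs.take (j+2)) - 1) := by
  have hlen1 : (cs.take (j+1)).length = j+1 := by simp; omega
  have hlen2 : (cs.take (j+2)).length = j+2 := by simp; omega
  apply le_antisymm
  · rcases Nat.eq_zero_or_pos (bfT (cs.take (j+1))) with h0 | h1
    · omega
    · set k := bfT (cs.take (j+1)) with hk
      have hkle : k ≤ j := by have := bfT_le (cs.take (j+1)); omega
      have hb : IsBorder (cs.take (j+1)) k := bfT_border _
      have hlcp : k ≤ lcp cs (cs.drop (j+1-k)) := (border_iff_lcp (by omega) (by omega)).mp hb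
      have hup : lcp cs (cs.drop (j+1-k)) ≤ cs.length - (j+1-k) := by
        have := lcp_le_right cs (cs.drop (j+1-k)); simpa using this
      have hzt : z.getD (j+1-k) 0 = lcp cs (cs.drop (j+1-k)) := hspec _ (by omega) (by omega)
      rcases eq_or_lt_of_le hlcp with he | hlt
      · have := le_Mup (z := z) (t := j+1-k) (i := cs.length - 1) (j := j)
          (by omega) (by omega) (by omega) (by omega)
        omega
      · have hb2 : IsBorder (cs.take (j+2)) (k+1) := by
          refine (border_iff_lcp (by omega) (by omega)).mpr ?_
          have : j+2-(k+1) = j+1-k := by omega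
          rw [this]
          omega
        have := bfT_max hb2 (by omega)
        omega
  · apply max_le
    · apply Mup_le
      intro t h1 h2 h3 h4
      have hzt : z.getD t 0 = lcp cs (cs.drop t) := hspec t h1 (by omega)
      have hb : IsBorder (cs.take (j+1)) (z.getD t 0) := by
        refine (border_iff_lcp (by omega) (by omega)).mpr ?_
        have : j+1-z.getD t 0 = t := by omega
        rw [this]
        omega
      exact bfT_max hb (by omega)
    · rcases Nat.eq_zero_or_pos (bfT (cs.take (j+2))) with h0 | h1
      · omega
      · set k := bfT (cs.take (j+2)) with hk
        have hkle : k ≤ j+1 := by have := bfT_le (cs.take (j+2)); omega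
        have hb : IsBorder (cs.take (j+2)) k := bfT_border _
        have hsnoc : cs.take (j+2) = cs.take (j+1) ++ [cs.getD (j+1) 'a'] :=
          take_succ_getD cs (j+1) (by omega)
        rw [hsnoc] at hb
        have hkk : k = (k-1)+1 := by omega
        rw [hkk] at hb
        have := ((border_snoc (by omega)).mp hb).1
        have := bfT_max this (by omega)
        omega

theorem conv2_spec {cs : List Char} {z : List Nat} (hn : 2 ≤ cs.length)
    (hspec : ∀ t, 1 ≤ t → t < cs.length → z.getD t 0 = lcp cs (cs.drop t)) :
    ∀ (j : Nat) (fail : List Nat), j ≤ cs.length - 2 → fail.length = cs.length →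
      (∀ t, j < t → t ≤ cs.length - 1 → fail.getD t 0 = bfT (cs.take (t+1))) →
      (∀ t, t ≤ j → fail.getD t 0 = Mup z (cs.length - 1) t) →
      ∀ t, 1 ≤ t → t ≤ cs.length - 1 → (conv2 j fail).getD t 0 = bfT (cs.take (t+1)) := by
  intro j
  induction j with
  | zero =>
    intro fail _ _ hhigh _ t ht1 ht2
    exact hhigh t (by omega) ht2
  | succ j ih =>
    intro fail hj hlen hhigh hlow t ht1 ht2
    have hv : fail.getD (j+2) 0 = bfT (cs.take (j+3)) := hhigh (j+2) (by omega) (by omega)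
    have hcur : fail.getD (j+1) 0 = Mup z (cs.length - 1) (j+1) := hlow (j+1) (le_refl _)
    have hkey : bfT (cs.take (j+2)) =
        max (Mup z (cs.length - 1) (j+1)) (bfT (cs.take (j+3)) - 1) :=
      key_mid (by omega) (by omega) hn hspec
    by_cases hc : fail.getD (j+1) 0 < fail.getD (j+2) 0 - 1
    · simp only [conv2]
      rw [if_pos hc]
      refine ih (fail.set (j+1) (fail.getD (j+2) 0 - 1)) (by omega) (by simpa using hlen)
        ?_ ?_ t ht1 ht2
      · intro t' ht'1 ht'2
        by_cases he : t' = j+1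
        · subst he
          rw [getD_set_self (by omega), show j+1+1 = j+2 by omega]
          omega
        · rw [getD_set_ne (by omega)]
          exact hhigh t' (by omega) ht'2
      · intro t' ht'
        rw [getD_set_ne (by omega)]
        exact hlow t' (by omega)
    · simp only [conv2]
      rw [if_neg hc]
      refine ih fail (by omega) hlen ?_ ?_ t ht1 ht2
      · intro t' ht'1 ht'2
        by_cases he : t' = j+1
        · subst he
          rw [show j+1+1 = j+2 by omega]
          omega
        · exact hhigh t' (by omega) ht'2
      · intro t' ht'
        exact hlow t' (by omega)

theorem getD_replicate0 {n q : Nat} : (List.replicate n (0:Nat)).getD q 0 = 0 := by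
  by_cases h : q < n
  · rw [List.getD_eq_getElem _ _ (by simpa using h)]
    simp
  · rw [List.getD_eq_default _ _ (by simpa using h)]

theorem failB_spec {cs : List Char} (hn : 2 ≤ cs.length) :
    ∀ t, 1 ≤ t → t ≤ cs.length - 1 →
      (conv2 (cs.length - 2)
        (conv1 (zArray cs) (cs.length - 1) (List.replicate cs.length 0))).getD t 0
        = bfT (cs.take (t+1)) := by
  have hspec := fun j a b => zArray_spec (cs := cs) j a b
  have hbound : ∀ t', 1 ≤ t' → t' ≤ cs.length - 1 → 0 < (zArray cs).getD t' 0 →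
      t' + (zArray cs).getD t' 0 - 1 < (List.replicate cs.length (0:Nat)).length := by
    intro t' a1 a2 a3
    have hz := hspec t' a1 (by omega)
    have hle : lcp cs (cs.drop t') ≤ cs.length - t' := by
      have := lcp_le_right cs (cs.drop t'); simpa using this
    simp only [List.length_replicate]
    omega
  have hM : ∀ q, (conv1 (zArray cs) (cs.length - 1) (List.replicate cs.length 0)).getD q 0
      = Mup (zArray cs) (cs.length - 1) q := by
    intro q
    rw [conv1_getD _ _ hbound, getD_replicate0]
    omega
  intro t ht1 ht2
  refine conv2_spec hn hspec (cs.length - 2) _ (by omega)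
    (by rw [conv1_length]; simp) ?_ ?_ t ht1 ht2
  · intro t' h1 h2
    have he : t' = cs.length - 1 := by omega
    rw [he, hM, show cs.length - 1 + 1 = cs.length by omega, List.take_length]
    exact (key_top hn hspec).symm
  · intro t' h
    exact hM t'

theorem all_borders_le {cs : List Char} {m : Nat} (_hm : 1 ≤ m) :
    ∀ k, k < (cs.take (m+1)).length → IsBorder (cs.take (m+1)) k → k ≤ bfT (cs.take m) + 1 := by
  intro k hk hb
  cases k with
  | zero => omega
  | succ k' =>
    by_cases hmn : m < cs.length
    · have hsnoc : cs.take (m+1) = cs.take m ++ [cs.getD m 'a'] := take_succ_getD cs m hmn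
      rw [hsnoc] at hb
      have hklt : k' < (cs.take m).length := by
        simp only [List.length_take] at hk ⊢
        omega
      have hbk := ((border_snoc hklt).mp hb).1
      have := bfT_max hbk hklt
      omega
    · have h1 : cs.take (m+1) = cs := List.take_of_length_le (by omega)
      have h2 : cs.take m = cs := List.take_of_length_le (by omega)
      rw [h1] at hb hk
      have := bfT_max hb hk
      rw [h2]
      omega

theorem kmpLoop_spec {cs : List Char} :
    ∀ (fuel : Nat) (arr : List Nat) (pl i : Nat),
      1 ≤ i → i ≤ cs.length → arr.length = cs.length → pl < i →
      IsBorder (cs.take i) pl →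
      (∀ j, j < i → arr.getD j 0 = bfT (cs.take (j+1))) →
      (∀ k, k < (cs.take (i+1)).length → IsBorder (cs.take (i+1)) k → k ≤ pl + 1) →
      2 * (cs.length - i) + pl ≤ fuel →
      ∀ j, j < cs.length → (kmpLoop cs fuel arr pl i).getD j 0 = bfT (cs.take (j+1)) := by
  intro fuel
  induction fuel with
  | zero =>
    intro arr pl i h1 h2 h3 h4 h5 h6 h7 h8 j hj
    simp only [kmpLoop]
    exact h6 j (by omega)
  | succ fuel ih =>
    intro arr pl i h1 h2 h3 h4 h5 h6 h7 h8 j hj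
    by_cases hlt : i < cs.length
    case neg =>
      simp only [kmpLoop]
      rw [if_neg hlt]
      exact h6 j (by omega)
    case pos =>
    simp only [kmpLoop]
    rw [if_pos hlt]
    have hlen1 : (cs.take (i+1)).length = i+1 := by simp; omega
    by_cases hmatch : cs.getD i 'a' == cs.getD pl 'a'
    · rw [if_pos hmatch]
      have hplchar : (cs.take i).getD pl 'a' = cs.getD i 'a' := by
        rw [getD_take h4]
        exact (beq_iff_eq.mp hmatch).symm
      have hsnoc : cs.take (i+1) = cs.take i ++ [cs.getD i 'a'] := take_succ_getD cs i hlt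
      have hbnew : IsBorder (cs.take (i+1)) (pl+1) := by
        rw [hsnoc]
        exact (border_snoc (by simp; omega)).mpr ⟨h5, hplchar⟩
      have hble := bfT_le (cs.take (i+1))
      have hbf : bfT (cs.take (i+1)) = pl + 1 := by
        apply le_antisymm
        · exact h7 _ (by omega) (bfT_border _)
        · exact bfT_max hbnew (by omega)
      refine ih (arr.set i (pl+1)) (pl+1) (i+1) (by omega) (by omega) (by simpa using h3)
        (by omega) hbnew ?_ ?_ (by omega) j hj
      · intro j' hj'
        by_cases he : j' = i
        · subst he
          rw [getD_set_self (by omega), hbf]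
        · rw [getD_set_ne (by omega)]
          exact h6 j' (by omega)
      · intro k hk hbk
        have := all_borders_le (m := i+1) (by omega) k hk hbk
        omega
    · rw [if_neg hmatch]
      by_cases hpl : 0 < pl
      · rw [if_pos hpl]
        have harr : arr.getD (pl-1) 0 = bfT (cs.take pl) := by
          have := h6 (pl-1) (by omega)
          rwa [show pl-1+1 = pl by omega] at this
        have hlenpl : (cs.take pl).length = pl := by simp; omega
        have hbi : IsBorder (cs.take i) (arr.getD (pl-1) 0) := by
          rw [harr]
          apply border_lift h5
          rw [List.take_take, min_eq_left (by omega)]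
          exact bfT_border _
        have hplt : arr.getD (pl-1) 0 < pl := by
          have := bfT_le (cs.take pl)
          rw [harr]
          omega
        refine ih arr (arr.getD (pl-1) 0) i h1 h2 h3 (by omega) hbi h6 ?_ (by omega) j hj
        intro k hk hbk
        cases k with
        | zero => omega
        | succ k' =>
          have hk7 := h7 _ hk hbk
          have hsnoc : cs.take (i+1) = cs.take i ++ [cs.getD i 'a'] := take_succ_getD cs i hlt
          rw [hsnoc] at hbk
          have hk'lt : k' < (cs.take i).length := by
            simp only [List.length_take] at hk ⊢
            omega
          obtain ⟨hbk', hck'⟩ := (border_snoc hk'lt).mp hbk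
          have hne : k' ≠ pl := by
            intro he
            subst he
            rw [getD_take h4] at hck'
            exact hmatch (beq_iff_eq.mpr hck'.symm)
          have hbp : IsBorder (cs.take pl) k' := by
            have := border_nest hbk' h5 (by omega)
            rwa [List.take_take, min_eq_left (by omega)] at this
          have := bfT_max hbp (by omega)
          rw [← harr] at this
          omega
      · rw [if_neg hpl]
        have hpl0 : pl = 0 := by omega
        have hbf0 : bfT (cs.take (i+1)) = 0 := by
          by_contra hne0
          have hble := bfT_le (cs.take (i+1))
          have hb := bfT_border (cs.take (i+1))
          have hle1 := h7 _ (by omega) hb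
          have hbf1 : bfT (cs.take (i+1)) = 1 := by omega
          rw [hbf1] at hb
          have hsnoc : cs.take (i+1) = cs.take i ++ [cs.getD i 'a'] := take_succ_getD cs i hlt
          rw [hsnoc] at hb
          obtain ⟨hb0, hc0⟩ := (border_snoc (k := 0) (by simp; omega)).mp hb
          rw [getD_take (by omega)] at hc0
          rw [hpl0] at hmatch
          exact hmatch (beq_iff_eq.mpr hc0.symm)
        refine ih (arr.set i 0) pl (i+1) (by omega) (by omega) (by simpa using h3)
          (by omega) (by rw [hpl0]; exact isBorder_zero _) ?_ ?_ (by omega) j hj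
        · intro j' hj'
          by_cases he : j' = i
          · subst he
            rw [getD_set_self (by omega), hbf0]
          · rw [getD_set_ne (by omega)]
            exact h6 j' (by omega)
        · intro k hk hbk
          have := all_borders_le (m := i+1) (by omega) k hk hbk
          omega

theorem build_next_array_spec {cs : List Char} (hn : 2 ≤ cs.length) :
    ∀ j, j < cs.length → (build_next_array cs).getD j 0 = bfT (cs.take (j+1)) := by
  intro j hj
  refine kmpLoop_spec (2*cs.length) _ 0 1 (by omega) (by omega) (by simp) (by omega)
    (isBorder_zero _) ?_ ?_ (by omega) j hj
  · intro j' hj'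
    have he : j' = 0 := by omega
    subst he
    rw [getD_set_self (by simp; omega)]
    have hb : bfT (cs.take (0+1)) = 0 := by
      unfold bfT
      have h1 : (cs.take (0+1)).length - 1 = 0 := by simp
      rw [h1, Nat.findGreatest_zero]
    rw [hb]
  · intro k hk _
    simp only [List.length_take] at hk
    omega

theorem walk_eq {a1 a2 : List Nat} {n : Nat}
    (hagree : ∀ p, 1 ≤ p → p < n → a1.getD p 0 = a2.getD p 0)
    (hbound : ∀ p, 1 ≤ p → p < n → a1.getD p 0 ≤ p) :
    ∀ (fuel pos total : Nat), pos < n → walkA a1 fuel pos total = walkB a2 fuel pos total := by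
  intro fuel
  induction fuel with
  | zero => intro pos total _; rfl
  | succ fuel ih =>
    intro pos total hpos
    simp only [walkA, walkB]
    by_cases h0 : 0 < pos
    · rw [if_pos h0, if_pos h0]
      have heq := hagree pos h0 hpos
      have hb := hbound pos h0 hpos
      by_cases hf : 0 < a1.getD pos 0
      · have hf2 : 0 < a2.getD pos 0 := by omega
        rw [if_pos hf, if_pos hf2, ← heq, if_pos (by omega)]
        exact ih _ _ (by omega)
      · have hf2 : ¬ 0 < a2.getD pos 0 := by omega
        rw [if_neg hf, if_neg hf2]
        exact ih _ _ (by omega)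
    · rw [if_neg h0, if_neg h0]

theorem ports_agree (s : String) : calculate_periods_sum s = calculate_periods_sum_alt s := by
  simp only [calculate_periods_sum, calculate_periods_sum_alt]
  by_cases h : s.toList.length ≤ 1
  · rw [if_pos h, if_pos h]
  · rw [if_neg h, if_neg h]
    have hn : 2 ≤ s.toList.length := by omega
    congr 1
    refine walk_eq (n := s.toList.length) ?_ ?_ _ _ _ (by omega)
    · intro p h1 h2
      rw [build_next_array_spec hn p h2, failB_spec hn p h1 (by omega)]
    · intro p h1 h2
      rw [build_next_array_spec hn p h2]
      have := bfT_le (s.toList.take (p+1))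
      simp only [List.length_take] at this
      omega

-- ===== VERDICT (by name: the statement is the Claim_ definition above) =====
theorem calculate_periods_sum_spec : Claim_equal_calculate_periods_sum := by
  intro s _
  exact ports_agree s
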